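-- pv_equiv track=rewrite | github.com/Ragunath041/Python | Programs/129_max points with cost.py | maxpoint
-- ===== SOURCE A (Python) =====
-- def maxpoint(points):
--     n = len(points)
--     index = []
--     summ = 0
--     for arr in points:
--         m = max(arr)
--         summ += m
--         index.append(arr.index(m))
--     x = 0
--     for i in range(len(index) - 1):
--         cost = abs(index[i] - index[i + 1])
--         x += cost
--     return summ - x
-- ===== SOURCE B (Python) =====
-- def maxpoint(points):
--     def best(arr):
--         # single scan: running (best value, index of its first occurrence)
--         bm, bi = arr[0], 0
--         for i, v in enumerate(arr):
--             if v > bm: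
--                 bm, bi = v, i
--         return bm, bi
--
--     def go(pairs):
--         if len(pairs) == 1:
--             return pairs[0][0]
--         m, i = pairs[0]
--         rest = pairs[1:]
--         return m - abs(i - rest[0][1]) + go(rest)
--
--     if not points:
--         return 0
--     return go([best(arr) for arr in points])
-- ===== Notes on version B (the rewrite author's own statement) =====
-- stated objective: alternative
-- what changed: B replaces A's max(arr)+arr.index(m) double scan per row with one enumerate scan keeping a (best, first-index) pair, and replaces A's staged loops (accumulate an index list, then an indexed second loop over it) with a recursion over the list of (max,index) pairs.
-- outside the precondition, e.g. on maxpoint([[], [1]]): A raises ValueError, B raises IndexError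
import Mathlib
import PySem

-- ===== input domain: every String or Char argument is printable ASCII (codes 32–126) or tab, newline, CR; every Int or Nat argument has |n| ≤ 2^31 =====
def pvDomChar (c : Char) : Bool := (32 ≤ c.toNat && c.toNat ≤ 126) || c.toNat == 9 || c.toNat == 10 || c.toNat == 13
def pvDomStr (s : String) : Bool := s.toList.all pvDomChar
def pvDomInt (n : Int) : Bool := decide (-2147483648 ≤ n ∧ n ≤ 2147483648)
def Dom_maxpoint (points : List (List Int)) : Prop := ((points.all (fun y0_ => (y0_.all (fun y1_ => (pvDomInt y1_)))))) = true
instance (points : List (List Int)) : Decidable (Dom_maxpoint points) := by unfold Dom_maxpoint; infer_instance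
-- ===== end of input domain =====

-- B replaces max()+.index() per row with one enumerate scan keeping (best, first index)
-- and replaces A's staged loops with a recursion over the (max, index) pairs; objective: alternative.

-- ===== PORT A =====
def maxpoint (points : List (List Int)) : Int :=
  let _n := points.length
  let st := points.foldl (fun (st : List Int × Int) arr =>
      let m := (PySem.List.max? arr (fun y => y)).getD 0
      let idx : Int := ((PySem.List.index? arr m).getD 0 : Nat)
      (st.1 ++ [idx], st.2 + m)) ([], 0)
  let index := st.1
  let summ := st.2
  let x := (PySem.List.pyRange 0 ((index.length : Int) - 1) 1).foldl
      (fun x i =>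
        let cost := |PySem.List.pyGetD index i 0 - PySem.List.pyGetD index (i + 1) 0|
        x + cost) 0
  summ - x

-- ===== PORT B =====
/-- Source B's `best`: one scan over enumerate(arr) keeping (best value, index of its first occurrence) -/
def pvBest (arr : List Int) : Int × Int :=
  (PySem.List.enumerate arr 0).foldl
    (fun (st : Int × Int) p => if p.2 > st.1 then (p.2, p.1) else st)
    (PySem.List.pyGetD arr 0 0, 0)

/-- Source B's `go`: recursion over the (max, index) pairs -/
def pvGo : List (Int × Int) → Int
  | [] => 0
  | [(m, _)] => m
  | (m, i) :: p :: rest => m - |i - p.2| + pvGo (p :: rest)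

def maxpoint_alt (points : List (List Int)) : Int :=
  if points = [] then 0 else pvGo (points.map pvBest)

-- ===== PRECONDITION & SPEC =====
-- Pre_ excludes inputs containing an empty row, on which Python A's max(arr) raises ValueError (B raises IndexError there).
def Pre_maxpoint (points : List (List Int)) : Prop := ∀ arr ∈ points, arr ≠ []
instance (points : List (List Int)) : Decidable (Pre_maxpoint points) := by unfold Pre_maxpoint; infer_instance
def pvWitness_maxpoint : List (List Int) := [[1, 3, 2], [4, 4], [0]]
def Spec_maxpoint (points : List (List Int)) (out : Int) : Prop := out = maxpoint_alt points
instance (points : List (List Int)) (out : Int) : Decidable (Spec_maxpoint points out) := by unfold Spec_maxpoint; infer_instance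

-- ===== CLAIM (what is proved, stated in full; the proofs are below) =====
def Claim_equal_maxpoint : Prop := ∀ (points : List (List Int)), Dom_maxpoint points → Pre_maxpoint points → Spec_maxpoint points (maxpoint points)

-- ===== LEMMAS AND PROOFS =====

/-- row maximum as port A computes it -/
def pvMi (arr : List Int) : Int := (PySem.List.max? arr (fun y => y)).getD 0
/-- first index of the row maximum as port A computes it -/
def pvIx (arr : List Int) : Int := ((PySem.List.index? arr (pvMi arr)).getD 0 : Nat)
/-- sum of absolute differences of adjacent elements -/
def pvAdj : List Int → Int
  | a :: b :: t => |a - b| + pvAdj (b :: t)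
  | _ => 0

lemma loopA (points : List (List Int)) (acc : List Int) (s : Int) :
    points.foldl (fun (st : List Int × Int) arr =>
      let m := (PySem.List.max? arr (fun y => y)).getD 0
      let idx : Int := ((PySem.List.index? arr m).getD 0 : Nat)
      (st.1 ++ [idx], st.2 + m)) (acc, s)
    = (acc ++ points.map pvIx, s + (points.map pvMi).sum) := by
  induction points generalizing acc s with
  | nil => simp
  | cons a t ih =>
    simp only [List.foldl_cons, List.map_cons, List.sum_cons]
    rw [ih]
    simp [pvMi, pvIx]
    ring

lemma sumAdj (l : List Int) :
    ((List.range (l.length - 1)).map (fun k => |l.getD k 0 - l.getD (k + 1) 0|)).sum = pvAdj l := by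
  induction l with
  | nil => simp [pvAdj]
  | cons a t ih =>
    cases t with
    | nil => simp [pvAdj]
    | cons b t' =>
      have h : (a :: b :: t').length - 1 = ((b :: t').length - 1) + 1 := by simp
      rw [h, List.range_succ_eq_map]
      simp only [List.map_cons, List.map_map, List.sum_cons]
      rw [pvAdj, ← ih]
      simp [Function.comp_def]

lemma loopX (l : List Int) :
    (PySem.List.pyRange 0 ((l.length : Int) - 1) 1).foldl
      (fun x i =>
        let cost := |PySem.List.pyGetD l i 0 - PySem.List.pyGetD l (i + 1) 0|
        x + cost) 0 = pvAdj l := by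
  rw [PySem.List.pyRange_one, List.foldl_map]
  have hfold : ∀ (ks : List Nat) (x0 : Int),
      ks.foldl (fun (x : Int) (k : Nat) =>
        let cost := |PySem.List.pyGetD l ((0 : Int) + (k : Int)) 0 - PySem.List.pyGetD l ((0 : Int) + (k : Int) + 1) 0|
        x + cost) x0
      = x0 + (ks.map (fun k => |l.getD k 0 - l.getD (k + 1) 0|)).sum := by
    intro ks
    induction ks with
    | nil => simp
    | cons k kt ih =>
      intro x0
      simp only [List.foldl_cons, List.map_cons, List.sum_cons, ih]
      have h1 : PySem.List.pyGetD l ((0 : Int) + (k : Int)) 0 = l.getD k 0 := by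
        simp
      have h2 : PySem.List.pyGetD l ((0 : Int) + (k : Int) + 1) 0 = l.getD (k + 1) 0 := by
        have h : ((0 : Int) + (k : Int) + 1) = ((k + 1 : Nat) : Int) := by push_cast; ring
        rw [h, PySem.List.pyGetD_natCast]
      show x0 + |PySem.List.pyGetD l ((0 : Int) + (k : Int)) 0 - PySem.List.pyGetD l ((0 : Int) + (k : Int) + 1) 0| + _ = _
      rw [h1, h2]
      ring
  have hlen : (((l.length : Int) - 1 - 0)).toNat = l.length - 1 := by omega
  rw [hfold, hlen, sumAdj l]
  ring

lemma A_char (points : List (List Int)) :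
    maxpoint points = (points.map pvMi).sum - pvAdj (points.map pvIx) := by
  unfold maxpoint
  rw [loopA]
  simp only [List.nil_append, zero_add]
  rw [loopX]

/-- the scan over `enumerate t k` starting from state (bm, bi) -/
lemma scanGen (t : List Int) (k bm bi : Int) :
    (PySem.List.enumerate t k).foldl
      (fun (st : Int × Int) p => if p.2 > st.1 then (p.2, p.1) else st) (bm, bi)
    = (t.foldl max bm,
       if bm < t.foldl max bm
       then k + (((PySem.List.index? t (t.foldl max bm)).getD 0 : Nat) : Int)
       else bi) := by
  induction t generalizing k bm bi with
  | nil => simp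
  | cons v t' ih =>
    rw [PySem.List.enumerate_cons, List.foldl_cons]
    by_cases hv : v > bm
    · simp only [hv, if_pos, gt_iff_lt]
      rw [ih]
      have hM : t'.foldl max v = (v :: t').foldl max bm := by
        simp [List.foldl_cons, max_eq_right (le_of_lt hv)]
      set M := (v :: t').foldl max bm with hMdef
      rw [hM]
      have hvM : v ≤ M := by
        rw [← hM]; exact (PySem.List.le_foldl_max t' v).1
      have hbmM : bm < M := lt_of_lt_of_le hv hvM
      rw [if_pos hbmM]
      by_cases hveq : v = M
      · have hnlt : ¬ v < M := by omega
        rw [if_neg hnlt, hveq, PySem.List.index?_cons_self]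
        simp
      · have hvlt : v < M := lt_of_le_of_ne hvM hveq
        rw [if_pos hvlt]
        have hMt : M ∈ t' := by
          rcases PySem.List.foldl_max_mem t' v with h | h
          · exact absurd (hM ▸ h.symm) hveq
          · exact hM ▸ h
        obtain ⟨j, hj⟩ : ∃ j, PySem.List.index? t' M = some j := by
          cases hidx : PySem.List.index? t' M with
          | none => exact absurd ((PySem.List.index?_eq_none_iff _ _).mp hidx) (by simp only [not_not]; exact hMt)
          | some j => exact ⟨j, rfl⟩
        rw [PySem.List.index?_cons_of_ne t' hveq, hj]
        simp only [Option.map_some, Option.getD_some, Prod.mk.injEq]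
        refine ⟨trivial, ?_⟩
        push_cast
        ring
    · simp only [gt_iff_lt, if_neg hv]
      rw [ih]
      have hmax : max bm v = bm := max_eq_left (by omega)
      have hM : t'.foldl max bm = (v :: t').foldl max bm := by
        simp [List.foldl_cons, hmax]
      set M := (v :: t').foldl max bm with hMdef
      rw [hM]
      by_cases hb : bm < M
      · rw [if_pos hb, if_pos hb]
        have hvne : v ≠ M := by omega
        have hMt : M ∈ t' := by
          rcases PySem.List.foldl_max_mem t' bm with h | h
          · exact absurd (hM ▸ h) (by omega)
          · exact hM ▸ h
        obtain ⟨j, hj⟩ : ∃ j, PySem.List.index? t' M = some j := by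
          cases hidx : PySem.List.index? t' M with
          | none => exact absurd ((PySem.List.index?_eq_none_iff _ _).mp hidx) (by simp only [not_not]; exact hMt)
          | some j => exact ⟨j, rfl⟩
        rw [PySem.List.index?_cons_of_ne t' hvne, hj]
        simp only [Option.map_some, Option.getD_some, Prod.mk.injEq]
        refine ⟨trivial, ?_⟩
        push_cast
        ring
      · rw [if_neg hb, if_neg hb]

lemma best_eq (a : Int) (t : List Int) :
    pvBest (a :: t) = (pvMi (a :: t), pvIx (a :: t)) := by
  have hMi : pvMi (a :: t) = t.foldl max a := by
    simp [pvMi, PySem.List.max?_id_cons]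
  unfold pvBest
  rw [PySem.List.enumerate_cons, List.foldl_cons]
  have h0 : PySem.List.pyGetD (a :: t) 0 0 = a := by
    simp [PySem.List.pyGetD, PySem.List.pyGet?, PySem.List.pyIdx?]
  rw [h0]
  have hstep : (if ((0 : Int), a).2 > ((a, (0 : Int)) : Int × Int).1 then (((0 : Int), a).2, ((0 : Int), a).1) else ((a, (0 : Int)) : Int × Int)) = ((a, (0 : Int)) : Int × Int) := by
    simp
  rw [hstep, scanGen]
  set M := t.foldl max a with hMdef
  have haM : a ≤ M := (PySem.List.le_foldl_max t a).1
  rw [Prod.mk.injEq]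
  refine ⟨hMi.symm, ?_⟩
  unfold pvIx
  rw [hMi]
  by_cases ha : a < M
  · rw [if_pos ha]
    have hane : a ≠ M := by omega
    have hMt : M ∈ t := by
      rcases PySem.List.foldl_max_mem t a with h | h
      · exact absurd (hMdef ▸ h) (by omega)
      · exact hMdef ▸ h
    obtain ⟨j, hj⟩ : ∃ j, PySem.List.index? t M = some j := by
      cases hidx : PySem.List.index? t M with
      | none => exact absurd ((PySem.List.index?_eq_none_iff _ _).mp hidx) (by simp only [not_not]; exact hMt)
      | some j => exact ⟨j, rfl⟩
    rw [PySem.List.index?_cons_of_ne t hane, hj]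
    simp only [Option.map_some, Option.getD_some]
    push_cast
    ring
  · rw [if_neg ha]
    have haeq : a = M := by omega
    rw [← haeq, PySem.List.index?_cons_self]
    simp

lemma go_eq (p : Int × Int) (ps : List (Int × Int)) :
    pvGo (p :: ps) = ((p :: ps).map Prod.fst).sum - pvAdj ((p :: ps).map Prod.snd) := by
  induction ps generalizing p with
  | nil =>
    obtain ⟨m, i⟩ := p
    simp [pvGo, pvAdj]
  | cons q r ih =>
    obtain ⟨m, i⟩ := p
    obtain ⟨m2, i2⟩ := q
    rw [pvGo, ih ⟨m2, i2⟩]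
    simp only [List.map_cons, List.sum_cons]
    rw [pvAdj]
    ring

lemma B_char (points : List (List Int)) (hpre : ∀ arr ∈ points, arr ≠ []) :
    maxpoint_alt points = (points.map pvMi).sum - pvAdj (points.map pvIx) := by
  unfold maxpoint_alt
  cases points with
  | nil => simp [pvAdj]
  | cons a t =>
    rw [if_neg (by simp)]
    have hmap : (a :: t).map pvBest = (a :: t).map (fun arr => (pvMi arr, pvIx arr)) := by
      apply List.map_congr_left
      intro arr harr
      cases arr with
      | nil => exact absurd rfl (hpre [] harr)
      | cons x xs => exact best_eq x xs
    rw [hmap]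
    simp only [List.map_cons]
    rw [go_eq]
    simp [List.map_map, Function.comp_def]

-- ===== VERDICT (by name: the statement is the Claim_ definition above) =====
theorem maxpoint_spec : Claim_equal_maxpoint := by
  intro points _ hpre
  show maxpoint points = maxpoint_alt points
  rw [A_char, B_char points hpre]
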